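-- pv_equiv track=rewrite | github.com/zxdmimfort/study_repo | tinkoff/true2.py | check_devs
-- ===== SOURCE A (Python) =====
-- def check_devs(devs: list[int]) -> bool:
--     devs.sort(reverse=True)
--     connections = 0
--     connections += devs[0]
--     for dev in devs[1:]:
--         if connections <= 0:
--             return False
--         connections += dev - 2
--     return True
-- ===== SOURCE B (Python) =====
-- def check_devs(devs: list[int]) -> bool:
--     devs.sort(reverse=True)
--     if len(devs) == 1:
--         return True
--     # The balances A checks form a concave sequence (its increments devs[1]-2,
--     # devs[2]-2, ... are non-increasing after the descending sort), so every
--     # intermediate balance is >= the minimum of the two endpoint balances: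
--     # all checks pass iff the first (devs[0]) and the last (sum(devs[:-1]) -
--     # 2*(len(devs)-2)) are positive.  No scan over the balances is needed.
--     return devs[0] > 0 and sum(devs[:-1]) > 2 * (len(devs) - 2)
-- ===== Notes on version B (the rewrite author's own statement) =====
-- stated objective: alternative
-- what changed: B replaces A's scan of all running balances by a closed-form endpoint test: since after the descending sort the balance sequence is concave, it checks only devs[0] > 0 and sum(devs[:-1]) > 2*(len(devs)-2).
import Mathlib
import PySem

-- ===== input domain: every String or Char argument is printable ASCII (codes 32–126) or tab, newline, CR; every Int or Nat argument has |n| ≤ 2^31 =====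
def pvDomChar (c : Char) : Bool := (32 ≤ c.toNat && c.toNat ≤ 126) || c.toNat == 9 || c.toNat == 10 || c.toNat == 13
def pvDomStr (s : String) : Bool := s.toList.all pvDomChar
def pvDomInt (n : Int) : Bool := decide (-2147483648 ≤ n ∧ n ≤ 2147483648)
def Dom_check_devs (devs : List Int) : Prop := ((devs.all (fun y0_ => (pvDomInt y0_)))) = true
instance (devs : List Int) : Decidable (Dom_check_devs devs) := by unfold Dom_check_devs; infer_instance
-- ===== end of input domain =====

-- B replaces A's balance-scanning loop by a closed-form endpoint test justified by concavity of the balance sequence (alternative algorithm, same cost).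
-- A mutates its argument in place (devs.sort); the equivalence proved here is about the return value only (B performs the same mutation).


-- ===== PORT A =====
-- the for-loop over devs[1:] with the running 'connections' accumulator and early return
def check_devs_go (connections : Int) : List Int → Bool
  | [] => true
  | dev :: rest => if connections ≤ 0 then false else check_devs_go (connections + (dev - 2)) rest

def check_devs (devs : List Int) : Bool :=
  match PySem.List.sorted devs (fun x => x) true with
  | [] => false          -- indexing the first element raises IndexError in Python here; excluded by Pre_check_devs
  | d0 :: rest => check_devs_go d0 rest

-- ===== PORT B =====
def check_devs_alt (devs : List Int) : Bool :=
  let s := PySem.List.sorted devs (fun x => x) true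
  if s.length = 1 then true
  else
    match s with
    | [] => false        -- indexing the first element raises IndexError in Python here; excluded by Pre_check_devs
    | d0 :: _ =>
      -- devs[0] > 0 and sum(devs[:-1]) > 2*(len(devs)-2)
      decide (0 < d0) && decide (2 * ((s.length : Int) - 2) < s.dropLast.sum)

-- ===== PRECONDITION & SPEC =====
-- A (and B) raise IndexError on the empty list when indexing its first element; exactly that input is excluded.
def Pre_check_devs (devs : List Int) : Prop := devs ≠ []
instance (devs : List Int) : Decidable (Pre_check_devs devs) := by unfold Pre_check_devs; infer_instance
def pvWitness_check_devs : List Int := [3, 1, 2]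

def Spec_check_devs (devs : List Int) (out : Bool) : Prop := out = check_devs_alt devs
instance (devs : List Int) (out : Bool) : Decidable (Spec_check_devs devs out) := by unfold Spec_check_devs; infer_instance

-- ===== CLAIM (what is proved, stated in full; the proofs are below) =====
def Claim_equal_check_devs : Prop := ∀ (devs : List Int), Dom_check_devs devs → Pre_check_devs devs → Spec_check_devs devs (check_devs devs)

-- ===== LEMMAS AND PROOFS =====

lemma sum_map_sub_two (l : List Int) : (l.map (fun d => d - 2)).sum = l.sum - 2 * l.length := by
  induction l with
  | nil => simp
  | cons a t ih => simp [ih]; ring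

-- concavity core: on a nonempty descending list, A's loop passes iff the first
-- check (0 < c) and the last check pass
lemma sum_nonpos_int (l : List Int) (h : ∀ x ∈ l, x ≤ 0) : l.sum ≤ 0 := by
  induction l with
  | nil => simp
  | cons a t ih =>
    have := h a (by simp)
    have := ih (fun x hx => h x (by simp [hx]))
    simp only [List.sum_cons]
    omega

lemma go_endpoints (rest : List Int) : ∀ (c : Int),
    rest ≠ [] → rest.Pairwise (fun a b => b ≤ a) →
    check_devs_go c rest
      = (decide (0 < c) && decide (0 < c + (rest.dropLast.map (fun d => d - 2)).sum)) := by
  induction rest with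
  | nil => intro c h; exact absurd rfl h
  | cons d r ih =>
    intro c _ hp
    rcases List.pairwise_cons.mp hp with ⟨hd, hr⟩
    cases r with
    | nil =>
      simp only [check_devs_go, List.dropLast_singleton, List.map_nil, List.sum_nil, add_zero,
        Bool.and_self]
      by_cases hc : c ≤ 0
      · simp [hc, show ¬ (0 < c) by omega]
      · simp [hc, show 0 < c by omega]
    | cons e t =>
      have step : check_devs_go c (d :: e :: t)
          = if c ≤ 0 then false else check_devs_go (c + (d - 2)) (e :: t) := rfl
      rw [step]
      by_cases hc : c ≤ 0
      · simp [hc, show ¬ (0 < c) by omega]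
      · rw [if_neg hc, ih (c + (d - 2)) (by simp) hr]
        have hdrop : (d :: e :: t).dropLast = d :: (e :: t).dropLast := rfl
        rw [hdrop, List.map_cons, List.sum_cons]
        have h1 : 0 < c := by omega
        by_cases hmid : 0 < c + (d - 2)
        · simp only [hmid, h1, decide_true, Bool.true_and, add_assoc]
        · -- middle check fails: then d - 2 < 0, so every later increment is < 0 and the
          -- last check fails too
          have h2 : d - 2 < 0 := by omega
          have hSle : ((e :: t).dropLast.map (fun d => d - 2)).sum ≤ 0 := by
            apply sum_nonpos_int
            intro x hx
            rcases List.mem_map.mp hx with ⟨y, hy, rfl⟩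
            have : y ≤ d := hd y (List.dropLast_subset _ hy)
            omega
          have hlast : ¬ (0 < c + ((d - 2) + ((e :: t).dropLast.map (fun d => d - 2)).sum)) := by
            omega
          simp only [hmid, hlast, decide_false, Bool.and_false, Bool.false_and]

-- ===== VERDICT (by name: the statement is the Claim_ definition above) =====
theorem check_devs_spec : Claim_equal_check_devs := by
  intro devs _ hpre
  unfold Spec_check_devs check_devs check_devs_alt
  cases h : PySem.List.sorted devs (fun x => x) true with
  | nil => exact absurd ((PySem.List.sorted_eq_nil_iff devs (fun x => x) true).mp h) hpre
  | cons d0 rest =>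
    have hsort : (d0 :: rest).Pairwise (fun a b : Int => b ≤ a) := by
      have := PySem.List.sorted_pairwise_rev devs (fun x : Int => x) 
      rw [h] at this
      exact this
    cases rest with
    | nil => simp [check_devs_go]
    | cons e t =>
      have hlen : ¬ ((d0 :: e :: t).length = 1) := by simp
      simp only [hlen, if_false]
      rw [go_endpoints (e :: t) d0 (by simp) (List.pairwise_cons.mp hsort).2]
      have hdrop : (d0 :: e :: t).dropLast = d0 :: (e :: t).dropLast := rfl
      rw [hdrop]
      have hlen2 : (e :: t).dropLast.length = t.length := by simp
      rw [sum_map_sub_two]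
      simp only [List.sum_cons, List.length_cons, hlen2]
      congr 1
      rw [decide_eq_decide]
      push_cast
      omega
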